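-- pv_equiv track=rewrite | github.com/duongttr/FPTU-Learning-Resources | 2021_Semester_2_Summer_2021/MAD101_VinhDP/Homeworks/induction_ver_2.py | solve
-- ===== SOURCE A (Python) =====
-- def solve(n):
--     if n == 1:
--         return ['1']
--     else:
--         ret = []
--         for i in range(1, n):
--             ret += [s + '+' +str(i) for s in solve(n-i)]
--         ret.append(str(n))
--         return ret
-- ===== SOURCE B (Python) =====
-- def solve(n):
--     # Bottom-up DP: build the composition lists for 1..n once each,
--     # instead of A's exponential recomputation via recursion.
--     if n < 1:
--         return [str(n)]
--     table = [[], ['1']]  # table[k] = compositions of k, index 0 unused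
--     for k in range(2, n + 1):
--         row = []
--         for i in range(1, k):
--             row += [s + '+' + str(i) for s in table[k - i]]
--         row.append(str(k))
--         table.append(row)
--     return table[n]
-- ===== Notes on version B (the rewrite author's own statement) =====
-- stated objective: alternative
-- what changed: Replaces A's plain recursion, which recomputes solve(k) exponentially often, with a bottom-up table that builds the composition list for each k=1..n exactly once (asymptotically fewer recomputations, though outputs are exponential so no feasible size shows a timing win).
import Mathlib
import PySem

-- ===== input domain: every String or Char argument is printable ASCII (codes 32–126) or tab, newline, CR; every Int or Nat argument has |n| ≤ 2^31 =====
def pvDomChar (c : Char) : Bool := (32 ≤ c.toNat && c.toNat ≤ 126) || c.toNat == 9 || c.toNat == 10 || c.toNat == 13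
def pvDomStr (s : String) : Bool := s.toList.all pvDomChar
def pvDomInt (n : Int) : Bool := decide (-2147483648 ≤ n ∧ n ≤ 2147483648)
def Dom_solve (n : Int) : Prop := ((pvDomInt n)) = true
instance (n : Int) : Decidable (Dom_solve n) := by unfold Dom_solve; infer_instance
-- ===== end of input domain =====

-- B replaces A's exponentially-recomputing recursion by a bottom-up table built once per subproblem (speed not measurable on feasible sizes).

-- ===== PORT A =====
-- Port of A's recursion; the `for i in range(1, n)` loop is the structural
-- recursion solveLoop, where the Nat parameter j encodes the loop variable i = j+1.
mutual
def solve (n : Int) : List String :=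
  if n = 1 then ["1"]
  else (solveLoop n 0) ++ [PySem.Int.toStr n]
termination_by (n.toNat + 1, n.toNat + 1)
decreasing_by exact Prod.Lex.right _ (by omega)

def solveLoop (n : Int) (j : Nat) : List String :=
  if ((j : Int) + 1) < n then
    ((solve (n - ((j : Int) + 1))).map (fun s => s ++ "+" ++ PySem.Int.toStr ((j : Int) + 1)))
      ++ solveLoop n (j + 1)
  else []
termination_by (n.toNat + 1, (n - j).toNat)
decreasing_by
  · exact Prod.Lex.left _ _ (by omega)
  · exact Prod.Lex.right _ (by omega)
end

-- ===== PORT B =====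
-- table[k-i] in Source B always hits a valid index; ported with List.getD (default never used).
def rowAlt (table : List (List String)) (k : Nat) : List String :=
  ((List.range' 1 (k - 1)).foldl
      (fun row i => row ++ ((table.getD (k - i) []).map (fun s => s ++ "+" ++ PySem.Int.toStr (i : Int))))
      [])
    ++ [PySem.Int.toStr (k : Int)]

def tableAlt : Nat → List (List String)
  | 0 => [[]]
  | 1 => [[], ["1"]]
  | (k + 2) =>
      let t := tableAlt (k + 1)
      t ++ [rowAlt t (k + 2)]

def solve_alt (n : Int) : List String :=
  if n < 1 then [PySem.Int.toStr n]
  else (tableAlt n.toNat).getD n.toNat []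

-- ===== PRECONDITION & SPEC =====
-- Pre_ excludes large n, on which Python A raises RecursionError: A recurses to depth n,
-- and the bound keeps n safely below CPython's default recursion limit.
def Pre_solve (n : Int) : Prop := n < 900
instance (n : Int) : Decidable (Pre_solve n) := by unfold Pre_solve; infer_instance
def pvWitness_solve : Int := (5)
def Spec_solve (n : Int) (out : List String) : Prop := out = solve_alt n
instance (n : Int) (out : List String) : Decidable (Spec_solve n out) := by unfold Spec_solve; infer_instance

-- ===== CLAIM (what is proved, stated in full; the proofs are below) =====
def Claim_equal_solve : Prop := ∀ (n : Int), Dom_solve n → Pre_solve n → Spec_solve n (solve n)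

-- ===== LEMMAS AND PROOFS =====

theorem flatMap_congr_mem {α β : Type} (l : List α) (f g : α → List β)
    (h : ∀ x ∈ l, f x = g x) : l.flatMap f = l.flatMap g := by
  induction l with
  | nil => rfl
  | cons a t ih =>
      simp only [List.flatMap_cons]
      rw [h a (by simp), ih (fun x hx => h x (by simp [hx]))]

theorem foldl_append_flat {α β : Type} (l : List α) (f : α → List β) (acc : List β) :
    l.foldl (fun acc x => acc ++ f x) acc = acc ++ l.flatMap f := by
  induction l generalizing acc with
  | nil => simp
  | cons a t ih => simp [ih, List.append_assoc]

theorem natrange_flatMap {β : Type} (g : Int → List β) (m : Nat) :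
    (List.range' 1 m).flatMap (fun (i : Nat) => g (i : Int)) =
      (PySem.List.pyRange 1 ((m : Int) + 1) 1).flatMap g := by
  induction m with
  | zero =>
      rw [PySem.List.pyRange_one_eq_nil (by omega)]
      rfl
  | succ m ih =>
      rw [List.range'_1_concat,
        show ((m + 1 : Nat) : Int) + 1 = ((m : Int) + 1) + 1 by push_cast; ring,
        PySem.List.pyRange_one_succ_right (by omega)]
      simp only [List.flatMap_append, ih]
      simp
      congr 1
      omega

theorem solveLoop_eq (k : Nat) : ∀ (n : Int) (j : Nat), (n - j).toNat ≤ k →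
    solveLoop n j =
      (PySem.List.pyRange ((j : Int) + 1) n 1).flatMap
        (fun i => (solve (n - i)).map (fun s => s ++ "+" ++ PySem.Int.toStr i)) := by
  induction k with
  | zero =>
      intro n j h
      rw [solveLoop]
      rw [if_neg (by omega), PySem.List.pyRange_one_eq_nil (by omega)]
      rfl
  | succ k ih =>
      intro n j h
      rw [solveLoop]
      by_cases hj : ((j : Int) + 1) < n
      · rw [if_pos hj, PySem.List.pyRange_one_cons hj, List.flatMap_cons,
          ih n (j + 1) (by omega)]
        push_cast
        ring_nf
      · rw [if_neg hj, PySem.List.pyRange_one_eq_nil (by omega)]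
        rfl

theorem solve_flat (n : Int) (hn : n ≠ 1) :
    solve n =
      (PySem.List.pyRange 1 n 1).flatMap
        (fun i => (solve (n - i)).map (fun s => s ++ "+" ++ PySem.Int.toStr i))
      ++ [PySem.Int.toStr n] := by
  rw [solve, if_neg hn, solveLoop_eq (n - (0:Nat)).toNat n 0 le_rfl]
  norm_num

theorem length_tableAlt (m : Nat) : (tableAlt m).length = m + 1 := by
  induction m with
  | zero => rfl
  | succ m ih =>
      match m, ih with
      | 0, _ => rfl
      | (k + 1), ih => simp [tableAlt, ih]

theorem tableAlt_correct (m : Nat) : ∀ j : Nat, 1 ≤ j → j ≤ m →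
    (tableAlt m).getD j [] = solve (j : Int) := by
  induction m with
  | zero => intro j h1 h2; omega
  | succ m ih =>
      intro j h1 h2
      match m, ih with
      | 0, _ =>
          have : j = 1 := by omega
          subst this
          rw [solve]
          norm_num [tableAlt]
      | (k + 1), ih =>
          show (tableAlt (k + 1) ++ [rowAlt (tableAlt (k + 1)) (k + 2)]).getD j [] = _
          by_cases hj : j ≤ k + 1
          · have hlen : j < (tableAlt (k + 1)).length := by rw [length_tableAlt]; omega
            rw [List.getD_append _ _ _ _ hlen]
            exact ih j h1 hj
          · have hjk : j = k + 2 := by omega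
            subst hjk
            have hlen : (tableAlt (k + 1)).length ≤ k + 2 := (length_tableAlt (k + 1)).le
            rw [List.getD_append_right _ _ _ _ hlen, length_tableAlt]
            simp only [Nat.sub_self, List.getD_cons_zero]
            -- row (k+2) equals solve (k+2)
            have hcast : ((k + 2 : Nat) : Int) = (k : Int) + 2 := by push_cast; ring
            rw [hcast, solve_flat ((k : Int) + 2) (by omega), rowAlt]
            rw [foldl_append_flat, List.nil_append]
            congr 1
            have hstep : (List.range' 1 (k + 2 - 1)).flatMap
                (fun i => ((tableAlt (k + 1)).getD (k + 2 - i) []).map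
                  (fun s => s ++ "+" ++ PySem.Int.toStr (i : Int)))
                = (List.range' 1 (k + 1)).flatMap
                    (fun (i : Nat) => (solve ((k : Int) + 2 - (i : Int))).map
                      (fun s => s ++ "+" ++ PySem.Int.toStr (i : Int))) := by
              apply flatMap_congr_mem
              intro i hi
              simp only [List.mem_range'_1] at hi
              rw [ih (k + 2 - i) (by omega) (by omega)]
              have : ((k + 2 - i : Nat) : Int) = (k : Int) + 2 - (i : Int) := by omega
              rw [this]
            rw [hstep,
              natrange_flatMap
                (fun (a : Int) => (solve ((k : Int) + 2 - a)).map (fun s => s ++ "+" ++ PySem.Int.toStr a))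
                (k + 1)]
            have hm : ((k + 1 : Nat) : Int) + 1 = (k : Int) + 2 := by push_cast; ring
            rw [hm]

-- ===== VERDICT (by name: the statement is the Claim_ definition above) =====
theorem solve_spec : Claim_equal_solve := by
  intro n _ _
  unfold Spec_solve solve_alt
  by_cases h : n < 1
  · rw [if_pos h, solve, if_neg (by omega), solveLoop]
    rw [if_neg (by omega)]
    rfl
  · rw [if_neg h]
    rw [tableAlt_correct n.toNat n.toNat (by omega) le_rfl]
    congr 1
    omega
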